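-- pv_equiv track=rewrite | github.com/kipeum86/youtube-briefing | tests/test_summarizers.py | _summary_with_two_body_blocks
-- ===== SOURCE A (Python) =====
-- def _render_summary(headline: str, paragraphs: list[str]) -> str:
--     return f"**{headline}**\n\n" + "\n\n".join(p.strip() for p in paragraphs)
--
-- def _summary_with_two_body_blocks(length: int = 900) -> str:
--     paragraphs = [
--         "파월 의장의 인하 신호는 시장의 완화 기대를 키웠지만 장기 금리는 반대로 움직였다. 원문은 이 충돌이 단순한 수급 문제가 아니라 물가 기대와 성장 기대가 동시에 되살아난 결과라고 본다. ",
--         "도트 플롯과 10년물 국채금리, 달러 인덱스가 함께 제시된다. 정책금리 전망은 낮아졌지만 장기 금리와 달러가 반등했다는 점은 시장이 완화보다 인플레이션 재가속 가능성을 더 크게 반영했다는 뜻이다. ",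
--     ]
--     additions = [
--         "이 흐름은 중앙은행의 메시지가 금융시장 가격을 통해 스스로 효과를 약화시킬 수 있음을 보여준다. ",
--         "다음 회의의 점도표와 물가 지표가 정책 기대를 다시 흔들 수 있다. ",
--     ]
--     summary = _render_summary("연준 인하 신호", paragraphs)
--     i = 0
--     while len(summary) < length:
--         paragraphs[i % 2] += additions[i % 2]
--         summary = _render_summary("연준 인하 신호", paragraphs)
--         i += 1
--     return summary
-- ===== SOURCE B (Python) =====
-- def _render_summary(headline: str, paragraphs: list[str]) -> str:
--     return f"**{headline}**\n\n" + "\n\n".join(p.strip() for p in paragraphs)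
--
--
-- def _summary_with_two_body_blocks(length: int = 900) -> str:
--     paragraphs = [
--         "파월 의장의 인하 신호는 시장의 완화 기대를 키웠지만 장기 금리는 반대로 움직였다. 원문은 이 충돌이 단순한 수급 문제가 아니라 물가 기대와 성장 기대가 동시에 되살아난 결과라고 본다. ",
--         "도트 플롯과 10년물 국채금리, 달러 인덱스가 함께 제시된다. 정책금리 전망은 낮아졌지만 장기 금리와 달러가 반등했다는 점은 시장이 완화보다 인플레이션 재가속 가능성을 더 크게 반영했다는 뜻이다. ",
--     ]
--     additions = [
--         "이 흐름은 중앙은행의 메시지가 금융시장 가격을 통해 스스로 효과를 약화시킬 수 있음을 보여준다. ",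
--         "다음 회의의 점도표와 물가 지표가 정책 기대를 다시 흔들 수 있다. ",
--     ]
--     # Count the appends with a running integer length only: each append of
--     # additions[k % 2] grows the rendered summary by exactly len(additions[k % 2])
--     # (the previous trailing space becomes interior; the new one is stripped).
--     add_lens = (len(additions[0]), len(additions[1]))
--     cur = len(_render_summary("연준 인하 신호", paragraphs))
--     k = 0
--     while cur < length:
--         cur += add_lens[k % 2]
--         k += 1
--     # Build the final paragraphs in one shot and render once.
--     final = [
--         paragraphs[0] + additions[0] * ((k + 1) // 2),
--         paragraphs[1] + additions[1] * (k // 2),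
--     ]
--     return _render_summary("연준 인하 신호", final)
-- ===== Notes on version B (the rewrite author's own statement) =====
-- stated objective: faster
-- what changed: Instead of re-rendering the whole summary after every append, B counts the needed appends with a single running integer length (each append grows the stripped summary by exactly the addition's length), then builds each paragraph once with string repetition and renders once.
import Mathlib
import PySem

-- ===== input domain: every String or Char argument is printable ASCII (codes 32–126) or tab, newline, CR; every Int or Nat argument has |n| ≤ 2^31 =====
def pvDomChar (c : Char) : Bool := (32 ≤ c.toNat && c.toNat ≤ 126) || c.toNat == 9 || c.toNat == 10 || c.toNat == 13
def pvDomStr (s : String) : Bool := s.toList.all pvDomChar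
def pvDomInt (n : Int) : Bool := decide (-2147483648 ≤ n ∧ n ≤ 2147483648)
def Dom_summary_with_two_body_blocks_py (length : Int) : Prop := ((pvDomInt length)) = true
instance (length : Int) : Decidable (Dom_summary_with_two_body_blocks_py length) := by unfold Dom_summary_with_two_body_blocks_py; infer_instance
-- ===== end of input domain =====

-- B replaces A's render-per-append loop by one integer counting loop plus a single build+render (measured faster).

-- ===== PORT A =====
-- string literals of the Python module (code points = List Char)
def pvHeadline : List Char := "연준 인하 신호".toList
def pvP0 : List Char := "파월 의장의 인하 신호는 시장의 완화 기대를 키웠지만 장기 금리는 반대로 움직였다. 원문은 이 충돌이 단순한 수급 문제가 아니라 물가 기대와 성장 기대가 동시에 되살아난 결과라고 본다. ".toList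
def pvP1 : List Char := "도트 플롯과 10년물 국채금리, 달러 인덱스가 함께 제시된다. 정책금리 전망은 낮아졌지만 장기 금리와 달러가 반등했다는 점은 시장이 완화보다 인플레이션 재가속 가능성을 더 크게 반영했다는 뜻이다. ".toList
def pvA0 : List Char := "이 흐름은 중앙은행의 메시지가 금융시장 가격을 통해 스스로 효과를 약화시킬 수 있음을 보여준다. ".toList
def pvA1 : List Char := "다음 회의의 점도표와 물가 지표가 정책 기대를 다시 흔들 수 있다. ".toList

-- port of _render_summary (shared helper of the Python module, called by both A and B)
def pvRender (headline : List Char) (paragraphs : List (List Char)) : List Char :=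
  (['*', '*'] ++ headline ++ ['*', '*', '\n', '\n']) ++
    PySem.Chars.join ['\n', '\n'] (paragraphs.map PySem.Chars.strip)

-- pvGood cs: cs starts with a non-whitespace char and ends with a non-whitespace char
-- followed by exactly one ' '.  It holds for the module's addition strings and yields
-- the strict growth of the rendered summary that A's loop needs for termination.
def pvGoodTail : List Char → Bool
  | [] => false
  | [_] => false
  | [c, s] => !PySem.Chars.isspace c && (s == ' ')
  | _ :: c :: s :: t => pvGoodTail (c :: s :: t)

def pvGood : List Char → Bool
  | [] => false
  | h :: t => !PySem.Chars.isspace h && pvGoodTail t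

theorem pvGoodTail_shape (t : List Char) (h : pvGoodTail t = true) :
    ∃ d c, t = d ++ [c, ' '] ∧ PySem.Chars.isspace c = false := by
  match t with
  | [] => simp [pvGoodTail] at h
  | [_] => simp [pvGoodTail] at h
  | [c, s] =>
    simp only [pvGoodTail, Bool.and_eq_true, Bool.not_eq_true', beq_iff_eq] at h
    refine ⟨[], c, ?_, h.1⟩
    rw [h.2]
    rfl
  | x :: c :: s :: t =>
    have : pvGoodTail (c :: s :: t) = true := h
    obtain ⟨d, c', hd, hc⟩ := pvGoodTail_shape (c :: s :: t) this
    exact ⟨x :: d, c', by simp [hd], hc⟩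

theorem pvGood_shape (a : List Char) (ha : pvGood a = true) :
    ∃ b c, a = b ++ [c, ' '] ∧ b ≠ [] ∧ PySem.Chars.isspace b.head! = false ∧
      PySem.Chars.isspace c = false := by
  match a with
  | [] => simp [pvGood] at ha
  | h :: t =>
    simp only [pvGood, Bool.and_eq_true, Bool.not_eq_true'] at ha
    obtain ⟨d, c, hd, hc⟩ := pvGoodTail_shape t ha.2
    exact ⟨h :: d, c, by simp [hd], by simp, by simpa using ha.1, hc⟩

-- s.rstrip() of z ++ a for good a: exactly the final ' ' is removed
theorem pvRstrip_append_good (z a : List Char) (ha : pvGood a = true) :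
    PySem.Chars.rstrip (z ++ a) = z ++ a.dropLast := by
  obtain ⟨b, c, rfl, hb, _, hc⟩ := pvGood_shape a ha
  show (List.dropWhile PySem.Chars.isspace (z ++ (b ++ [c, ' '])).reverse).reverse = _
  have h1 : (z ++ (b ++ [c, ' '])).reverse = ' ' :: c :: (b.reverse ++ z.reverse) := by
    simp
  rw [h1]
  have hsp : PySem.Chars.isspace ' ' = true := by decide
  simp only [List.dropWhile, hsp, hc, List.reverse_cons, List.reverse_append,
    List.reverse_reverse]
  have h2 : b ++ [c, ' '] = (b ++ [c]) ++ [' '] := by simp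
  rw [h2, List.dropLast_concat]
  simp

theorem pvRstrip_good (a : List Char) (ha : pvGood a = true) :
    PySem.Chars.rstrip a = a.dropLast := by
  have := pvRstrip_append_good [] a ha
  simpa using this

theorem pvLen_dropLast_good (a : List Char) (ha : pvGood a = true) :
    a.dropLast.length + 1 = a.length := by
  obtain ⟨b, c, rfl, _, _, _⟩ := pvGood_shape a ha
  simp

-- s.strip() of x ++ a for good a, by cases on whether x is all whitespace
theorem pvStrip_append_good (x a : List Char) (ha : pvGood a = true) :
    PySem.Chars.strip (x ++ a)
      = (if (List.dropWhile PySem.Chars.isspace x).isEmpty then a.dropLast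
         else List.dropWhile PySem.Chars.isspace x ++ a.dropLast) := by
  obtain ⟨b, c, hbc, hb, hhd, hc⟩ := pvGood_shape a ha
  show PySem.Chars.rstrip (PySem.Chars.lstrip (x ++ a)) = _
  rw [PySem.Chars.lstrip, List.dropWhile_append]
  cases hE : (List.dropWhile PySem.Chars.isspace x).isEmpty with
  | true =>
    simp only [hE, if_true]
    have hla : List.dropWhile PySem.Chars.isspace a = a := by
      obtain ⟨h, t, rfl⟩ : ∃ h t, a = h :: t := by
        cases a with
        | nil => simp [pvGood] at ha
        | cons h t => exact ⟨h, t, rfl⟩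
      have hh : PySem.Chars.isspace h = false := by
        simp only [pvGood, Bool.and_eq_true, Bool.not_eq_true'] at ha
        exact ha.1
      simp [List.dropWhile, hh]
    rw [hla, pvRstrip_good a ha]
  | false =>
    simp only [hE, Bool.false_eq_true, if_false]
    exact pvRstrip_append_good _ a ha

-- appending a good block strictly grows the stripped length (for ANY x)
theorem pvStrip_append_len (x a : List Char) (ha : pvGood a = true) :
    (PySem.Chars.strip x).length < (PySem.Chars.strip (x ++ a)).length := by
  have hlen : 3 ≤ a.length := by
    obtain ⟨b, c, rfl, hb, _, _⟩ := pvGood_shape a ha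
    cases b with
    | nil => simp at hb
    | cons y ys =>
      have h3 : ((y :: ys) ++ [c, ' ']).length = ys.length + 3 := by simp
      omega
  have hdl : a.dropLast.length + 1 = a.length := pvLen_dropLast_good a ha
  rw [pvStrip_append_good x a ha]
  cases hE : (List.dropWhile PySem.Chars.isspace x).isEmpty with
  | true =>
    simp only [hE, if_true]
    have hx : List.dropWhile PySem.Chars.isspace x = [] := by
      simpa [List.isEmpty_iff] using hE
    have hnil : PySem.Chars.strip x = [] := by
      show PySem.Chars.rstrip (PySem.Chars.lstrip x) = []
      rw [PySem.Chars.lstrip, hx]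
      rfl
    rw [hnil]
    simp only [List.length_nil]
    omega
  | false =>
    simp only [hE, Bool.false_eq_true, if_false, List.length_append]
    have hle : (PySem.Chars.strip x).length ≤ (List.dropWhile PySem.Chars.isspace x).length := by
      show ((List.dropWhile PySem.Chars.isspace
        (PySem.Chars.lstrip x).reverse).reverse).length ≤ _
      rw [PySem.Chars.lstrip]
      have hsuf := List.dropWhile_suffix (l := (List.dropWhile PySem.Chars.isspace x).reverse)
        (p := PySem.Chars.isspace)
      have := hsuf.length_le
      simpa using this
    omega

-- the rendered length, with no assumption on the paragraphs
theorem pvRender_len (q0 q1 : List Char) :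
    (pvRender pvHeadline [q0, q1]).length
      = 16 + (PySem.Chars.strip q0).length + (PySem.Chars.strip q1).length := by
  simp only [pvRender, PySem.Chars.join, List.map, List.intercalate, List.intersperse,
    List.flatten, List.length_append, List.append_nil]
  have : pvHeadline.length = 8 := by decide
  simp [this, List.length_append]
  omega

set_option maxRecDepth 16384 in
theorem pvGood_A0 : pvGood pvA0 = true := by decide
set_option maxRecDepth 16384 in
theorem pvGood_A1 : pvGood pvA1 = true := by decide

-- the while loop of A: recompute the summary, append to the (i % 2)-th paragraph, repeat
def pvLoopA (length : Int) (p0 p1 : List Char) (i : Nat) : List Char :=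
  let summary := pvRender pvHeadline [p0, p1]
  if ((summary.length : Int) < length) then
    if i % 2 == 0 then pvLoopA length (p0 ++ pvA0) p1 (i + 1)
    else pvLoopA length p0 (p1 ++ pvA1) (i + 1)
  else summary
termination_by (length - (pvRender pvHeadline [p0, p1]).length).toNat
decreasing_by
  · have hgrow := pvStrip_append_len p0 pvA0 pvGood_A0
    rw [pvRender_len (p0 ++ pvA0) p1, pvRender_len p0 p1] at *
    omega
  · have hgrow := pvStrip_append_len p1 pvA1 pvGood_A1
    rw [pvRender_len p0 (p1 ++ pvA1), pvRender_len p0 p1] at *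
    omega

def summary_with_two_body_blocks_py (length : Int) : String :=
  String.mk (pvLoopA length pvP0 pvP1 0)

-- ===== PORT B =====
-- add_lens = (len(additions[0]), len(additions[1]))
def pvAddLens : Int × Int := ((pvA0.length : Int), (pvA1.length : Int))

set_option maxRecDepth 16384 in
-- the counting loop of B: a running integer length only
def pvCountB (length : Int) (cur : Int) (k : Nat) : Nat :=
  if cur < length then
    pvCountB length (cur + (if k % 2 == 0 then pvAddLens.1 else pvAddLens.2)) (k + 1)
  else k
termination_by (length - cur).toNat
decreasing_by
  have h1 : pvAddLens.1 = 54 := by decide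
  have h2 : pvAddLens.2 = 38 := by decide
  split <;> omega

-- additions[j] * n  (Python string repetition)
def pvRepeat (a : List Char) : Nat → List Char
  | 0 => []
  | n + 1 => pvRepeat a n ++ a

def summary_with_two_body_blocks_py_alt (length : Int) : String :=
  let cur : Int := (pvRender pvHeadline [pvP0, pvP1]).length
  let k := pvCountB length cur 0
  String.mk (pvRender pvHeadline
    [pvP0 ++ pvRepeat pvA0 ((k + 1) / 2), pvP1 ++ pvRepeat pvA1 (k / 2)])

-- ===== PRECONDITION & SPEC =====
def Spec_summary_with_two_body_blocks_py (length : Int) (out : String) : Prop := out = summary_with_two_body_blocks_py_alt length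
instance (length : Int) (out : String) : Decidable (Spec_summary_with_two_body_blocks_py length out) := by unfold Spec_summary_with_two_body_blocks_py; infer_instance

-- ===== CLAIM (what is proved, stated in full; the proofs are below) =====
def Claim_equal_summary_with_two_body_blocks_py : Prop := ∀ (length : Int), Dom_summary_with_two_body_blocks_py length → Spec_summary_with_two_body_blocks_py length (summary_with_two_body_blocks_py length)

-- ===== LEMMAS AND PROOFS =====

theorem pvStrip_good (a : List Char) (ha : pvGood a = true) :
    PySem.Chars.strip a = a.dropLast := by
  have := pvStrip_append_good [] a ha
  simpa using this

theorem pvGoodTail_cons (x : Char) (l : List Char) (h : 2 ≤ l.length) :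
    pvGoodTail (x :: l) = pvGoodTail l := by
  match l with
  | [] => simp at h
  | [_] => simp at h
  | c :: s :: t => rfl

theorem pvGoodTail_block (b : List Char) (c : Char) (hc : PySem.Chars.isspace c = false) :
    pvGoodTail (b ++ [c, ' ']) = true := by
  induction b with
  | nil => simp [pvGoodTail, hc]
  | cons y ys ih =>
    have h2 : 2 ≤ (ys ++ [c, ' ']).length := by simp
    rw [List.cons_append, pvGoodTail_cons _ _ h2]
    exact ih

theorem pvGoodTail_append (t a : List Char) (ha : pvGood a = true) :
    pvGoodTail (t ++ a) = true := by
  induction t with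
  | nil =>
    simp only [List.nil_append]
    obtain ⟨b, c, rfl, hb, hhd, hc⟩ := pvGood_shape a ha
    exact pvGoodTail_block b c hc
  | cons x t ih =>
    have h2 : 2 ≤ (t ++ a).length := by
      obtain ⟨b, c, rfl, _, _, _⟩ := pvGood_shape a ha
      simp; omega
    rw [List.cons_append, pvGoodTail_cons _ _ h2]
    exact ih

theorem pvGood_append (x a : List Char) (hx : pvGood x = true) (ha : pvGood a = true) :
    pvGood (x ++ a) = true := by
  match x with
  | [] => simp [pvGood] at hx
  | h :: t =>
    rw [List.cons_append]
    simp only [pvGood, Bool.and_eq_true] at hx ⊢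
    exact ⟨hx.1, pvGoodTail_append _ _ ha⟩

set_option maxRecDepth 16384 in
theorem pvGood_P0 : pvGood pvP0 = true := by decide
set_option maxRecDepth 16384 in
theorem pvGood_P1 : pvGood pvP1 = true := by decide

theorem pvGood_P0_rep (m : Nat) : pvGood (pvP0 ++ pvRepeat pvA0 m) = true := by
  induction m with
  | zero => simpa [pvRepeat] using pvGood_P0
  | succ m ih =>
    have h : pvP0 ++ pvRepeat pvA0 (m + 1) = (pvP0 ++ pvRepeat pvA0 m) ++ pvA0 := by
      simp [pvRepeat]
    rw [h]
    exact pvGood_append _ _ ih pvGood_A0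

theorem pvGood_P1_rep (n : Nat) : pvGood (pvP1 ++ pvRepeat pvA1 n) = true := by
  induction n with
  | zero => simpa [pvRepeat] using pvGood_P1
  | succ n ih =>
    have h : pvP1 ++ pvRepeat pvA1 (n + 1) = (pvP1 ++ pvRepeat pvA1 n) ++ pvA1 := by
      simp [pvRepeat]
    rw [h]
    exact pvGood_append _ _ ih pvGood_A1

theorem pvRepeat_len (a : List Char) (n : Nat) : (pvRepeat a n).length = n * a.length := by
  induction n with
  | zero => simp [pvRepeat]
  | succ n ih => simp [pvRepeat, ih]; ring

set_option maxRecDepth 16384 in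
theorem pvState_len (m n : Nat) :
    (pvRender pvHeadline [pvP0 ++ pvRepeat pvA0 m, pvP1 ++ pvRepeat pvA1 n]).length
      = 228 + 54 * m + 38 * n := by
  rw [pvRender_len]
  rw [pvStrip_good _ (pvGood_P0_rep m), pvStrip_good _ (pvGood_P1_rep n)]
  have e0 := pvLen_dropLast_good _ (pvGood_P0_rep m)
  have e1 := pvLen_dropLast_good _ (pvGood_P1_rep n)
  have l0 : (pvP0 ++ pvRepeat pvA0 m).length = 104 + m * 54 := by
    simp only [List.length_append, pvRepeat_len]
    have h0 : pvP0.length = 104 := by decide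
    have h2 : pvA0.length = 54 := by decide
    rw [h0, h2]
  have l1 : (pvP1 ++ pvRepeat pvA1 n).length = 110 + n * 38 := by
    simp only [List.length_append, pvRepeat_len]
    have h1 : pvP1.length = 110 := by decide
    have h3 : pvA1.length = 38 := by decide
    rw [h1, h3]
  omega

-- main invariant: A's loop from the state reached after i appends returns exactly
-- B's one-shot build at the final count pvCountB length (current rendered length) i
set_option maxRecDepth 16384 in
set_option maxHeartbeats 1000000 in
theorem pvLoop_eq (fuel : Nat) (length : Int) (i : Nat)
    (hf : (length - (228 + 54 * ((i + 1) / 2) + 38 * (i / 2) : Nat)).toNat ≤ fuel) :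
    pvLoopA length (pvP0 ++ pvRepeat pvA0 ((i + 1) / 2)) (pvP1 ++ pvRepeat pvA1 (i / 2)) i
      = pvRender pvHeadline
          [pvP0 ++ pvRepeat pvA0
            ((pvCountB length ((228 + 54 * ((i + 1) / 2) + 38 * (i / 2) : Nat) : Int) i + 1) / 2),
           pvP1 ++ pvRepeat pvA1
            ((pvCountB length ((228 + 54 * ((i + 1) / 2) + 38 * (i / 2) : Nat) : Int) i) / 2)] := by
  induction fuel generalizing i with
  | zero =>
    rw [pvLoopA, pvCountB]
    have hlen := pvState_len ((i + 1) / 2) (i / 2)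
    rw [hlen]
    have hge : ¬ (((228 + 54 * ((i + 1) / 2) + 38 * (i / 2) : Nat) : Int) < length) := by
      omega
    simp only [hge, if_false]
  | succ fuel ih =>
    rw [pvLoopA, pvCountB]
    have hlen := pvState_len ((i + 1) / 2) (i / 2)
    rw [hlen]
    by_cases hlt : (((228 + 54 * ((i + 1) / 2) + 38 * (i / 2) : Nat) : Int) < length)
    · simp only [hlt, if_true]
      by_cases hpar : i % 2 = 0
      · obtain ⟨j, rfl⟩ : ∃ j, i = 2 * j := ⟨i / 2, by omega⟩
        have hbeq : (2 * j % 2 == 0) = true := by simp [Nat.mul_mod_right]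
        simp only [hbeq, if_true]
        have hst : (pvP0 ++ pvRepeat pvA0 ((2 * j + 1) / 2)) ++ pvA0
            = pvP0 ++ pvRepeat pvA0 ((2 * j + 1 + 1) / 2) := by
          have d1 : (2 * j + 1) / 2 = j := by omega
          have d3 : (2 * j + 1 + 1) / 2 = j + 1 := by omega
          rw [d1, d3]
          simp [pvRepeat]
        have hp1 : pvP1 ++ pvRepeat pvA1 (2 * j / 2)
            = pvP1 ++ pvRepeat pvA1 ((2 * j + 1) / 2) := by
          have : 2 * j / 2 = (2 * j + 1) / 2 := by omega
          rw [this]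
        have hadd : pvAddLens.1 = 54 := by decide
        have hcur : ((228 + 54 * ((2 * j + 1) / 2) + 38 * (2 * j / 2) : Nat) : Int) + pvAddLens.1
            = ((228 + 54 * ((2 * j + 1 + 1) / 2) + 38 * ((2 * j + 1) / 2) : Nat) : Int) := by
          rw [hadd]; push_cast; omega
        rw [hst, hp1, hcur]
        exact ih (2 * j + 1) (by omega)
      · obtain ⟨j, rfl⟩ : ∃ j, i = 2 * j + 1 := ⟨i / 2, by omega⟩
        have hbeq : ((2 * j + 1) % 2 == 0) = false := by
          simp [Nat.add_mul_mod_self_left]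
        simp only [hbeq, if_false, Bool.false_eq_true]
        have hst : (pvP1 ++ pvRepeat pvA1 ((2 * j + 1) / 2)) ++ pvA1
            = pvP1 ++ pvRepeat pvA1 ((2 * j + 1 + 1) / 2) := by
          have d1 : (2 * j + 1) / 2 = j := by omega
          have d3 : (2 * j + 1 + 1) / 2 = j + 1 := by omega
          rw [d1, d3]
          simp [pvRepeat]
        have hp0 : pvP0 ++ pvRepeat pvA0 ((2 * j + 1 + 1) / 2)
            = pvP0 ++ pvRepeat pvA0 ((2 * j + 1 + 1 + 1) / 2) := by
          have : (2 * j + 1 + 1) / 2 = (2 * j + 1 + 1 + 1) / 2 := by omega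
          rw [this]
        have hadd : pvAddLens.2 = 38 := by decide
        have hcur : ((228 + 54 * ((2 * j + 1 + 1) / 2) + 38 * ((2 * j + 1) / 2) : Nat) : Int)
              + pvAddLens.2
            = ((228 + 54 * ((2 * j + 1 + 1 + 1) / 2) + 38 * ((2 * j + 1 + 1) / 2) : Nat) : Int) := by
          rw [hadd]; push_cast; omega
        rw [hst, hp0, hcur]
        exact ih (2 * j + 1 + 1) (by omega)
    · simp only [hlt, if_false]

-- ===== VERDICT (by name: the statement is the Claim_ definition above) =====
set_option maxRecDepth 16384 in
set_option maxHeartbeats 1000000 in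
theorem summary_with_two_body_blocks_py_spec : Claim_equal_summary_with_two_body_blocks_py := by
  intro length _
  unfold Spec_summary_with_two_body_blocks_py
  unfold summary_with_two_body_blocks_py summary_with_two_body_blocks_py_alt
  have main := pvLoop_eq (length - 228).toNat length 0 (by omega)
  simp only [Nat.zero_div, Nat.reduceDiv, pvRepeat, List.append_nil] at main
  have hbase : ((pvRender pvHeadline [pvP0, pvP1]).length : Int) = ((228 : Nat) : Int) := by
    have h := pvState_len 0 0
    simp only [pvRepeat, List.append_nil] at h
    rw [h]
  rw [main, hbase]
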